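-- pv_equiv track=rewrite | github.com/PedroLantyer/Uniruy-Listas-Paradigmas-Python | ex25.py | failed
-- ===== SOURCE A (Python) =====
-- def failed(result,attendance):
--     count = [0,0,0,0]
--     for i in range(len(result)):
--         if attendance[i] < 40 and result[i] < 6:
--             count[3] += 1
--             count[2] += 1
--         elif attendance[i] < 40:
--             count[3] += 1
--             count[1] += 1
--         elif result[i] < 6:
--             count[3] += 1
--             count[0] += 1
--     return count
-- ===== SOURCE B (Python) =====
-- def failed(result, attendance):
--     n = len(result)
--     res_only = sum(1 for i in range(n) if attendance[i] >= 40 and result[i] < 6)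
--     att_only = sum(1 for i in range(n) if attendance[i] < 40 and result[i] >= 6)
--     both = sum(1 for i in range(n) if attendance[i] < 40 and result[i] < 6)
--     return [res_only, att_only, both, res_only + att_only + both]
-- ===== Notes on version B (the rewrite author's own statement) =====
-- stated objective: alternative
-- what changed: A's single loop with an exclusive if/elif chain incrementing four mutable counters is replaced by three independent comprehension sums, one per mutually-exclusive failure category, with the total derived as their sum instead of being incremented in every branch.
import Mathlib
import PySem

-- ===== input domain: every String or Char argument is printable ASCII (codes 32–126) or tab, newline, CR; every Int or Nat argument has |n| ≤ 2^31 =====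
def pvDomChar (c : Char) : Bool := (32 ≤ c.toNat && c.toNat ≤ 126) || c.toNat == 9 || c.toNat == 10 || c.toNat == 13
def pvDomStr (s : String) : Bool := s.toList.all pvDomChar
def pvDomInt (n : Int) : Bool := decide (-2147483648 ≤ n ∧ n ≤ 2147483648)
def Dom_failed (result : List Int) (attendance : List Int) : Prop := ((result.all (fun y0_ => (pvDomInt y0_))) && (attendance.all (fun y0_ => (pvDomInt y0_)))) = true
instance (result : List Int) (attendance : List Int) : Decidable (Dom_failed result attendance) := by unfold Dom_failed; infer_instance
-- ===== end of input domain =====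

-- B replaces A's exclusive if/elif chain over four mutable counters by three
-- independent category sums with the total derived as their sum (objective: alternative).

-- ===== PORT A =====
-- the four-element count list is carried as a 4-tuple (count[0],count[1],count[2],count[3])
def failed (result : List Int) (attendance : List Int) : List Int :=
  let count :=
    (PySem.List.pyRange 0 result.length 1).foldl (fun c i =>
      if PySem.List.pyGetD attendance i 0 < 40 ∧ PySem.List.pyGetD result i 0 < 6 then
        (c.1, c.2.1, c.2.2.1 + 1, c.2.2.2 + 1)
      else if PySem.List.pyGetD attendance i 0 < 40 then
        (c.1, c.2.1 + 1, c.2.2.1, c.2.2.2 + 1)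
      else if PySem.List.pyGetD result i 0 < 6 then
        (c.1 + 1, c.2.1, c.2.2.1, c.2.2.2 + 1)
      else c)
      ((0 : Int), (0 : Int), (0 : Int), (0 : Int))
  [count.1, count.2.1, count.2.2.1, count.2.2.2]

-- ===== PORT B =====
-- sum(1 for i in range(n) if p(attendance[i], result[i]))
def pvCatSum (result : List Int) (attendance : List Int) (p : Int → Int → Prop)
    [DecidablePred fun i : Int => p (PySem.List.pyGetD attendance i 0) (PySem.List.pyGetD result i 0)] : Int :=
  ((PySem.List.pyRange 0 result.length 1).map (fun i =>
    if p (PySem.List.pyGetD attendance i 0) (PySem.List.pyGetD result i 0) then (1 : Int) else 0)).sum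

def failed_alt (result : List Int) (attendance : List Int) : List Int :=
  let resOnly := pvCatSum result attendance (fun a r => 40 ≤ a ∧ r < 6)
  let attOnly := pvCatSum result attendance (fun a r => a < 40 ∧ 6 ≤ r)
  let both := pvCatSum result attendance (fun a r => a < 40 ∧ r < 6)
  [resOnly, attOnly, both, resOnly + attOnly + both]

-- ===== PRECONDITION & SPEC =====
-- Pre_ excludes exactly the inputs where Python A raises IndexError (attendance shorter than result)
def Pre_failed (result : List Int) (attendance : List Int) : Prop :=
  result.length ≤ attendance.length
instance (result : List Int) (attendance : List Int) : Decidable (Pre_failed result attendance) := by unfold Pre_failed; infer_instance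
def pvWitness_failed : List Int × List Int := ([3, 7], [30, 50])

def Spec_failed (result : List Int) (attendance : List Int) (out : List Int) : Prop := out = failed_alt result attendance
instance (result : List Int) (attendance : List Int) (out : List Int) : Decidable (Spec_failed result attendance out) := by unfold Spec_failed; infer_instance

-- ===== CLAIM (what is proved, stated in full; the proofs are below) =====
def Claim_equal_failed : Prop := ∀ (result : List Int) (attendance : List Int), Dom_failed result attendance → Pre_failed result attendance → Spec_failed result attendance (failed result attendance)

-- ===== LEMMAS AND PROOFS =====

-- A's fold accumulates exactly B's three category sums plus their total
theorem pvFold_eq (result attendance : List Int) (l : List Int) (x y z w : Int) :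
    l.foldl (fun (c : Int × Int × Int × Int) i =>
      if PySem.List.pyGetD attendance i 0 < 40 ∧ PySem.List.pyGetD result i 0 < 6 then
        (c.1, c.2.1, c.2.2.1 + 1, c.2.2.2 + 1)
      else if PySem.List.pyGetD attendance i 0 < 40 then
        (c.1, c.2.1 + 1, c.2.2.1, c.2.2.2 + 1)
      else if PySem.List.pyGetD result i 0 < 6 then
        (c.1 + 1, c.2.1, c.2.2.1, c.2.2.2 + 1)
      else c) (x, y, z, w)
    = (x + (l.map (fun i => if 40 ≤ PySem.List.pyGetD attendance i 0 ∧ PySem.List.pyGetD result i 0 < 6 then (1:Int) else 0)).sum,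
       y + (l.map (fun i => if PySem.List.pyGetD attendance i 0 < 40 ∧ 6 ≤ PySem.List.pyGetD result i 0 then (1:Int) else 0)).sum,
       z + (l.map (fun i => if PySem.List.pyGetD attendance i 0 < 40 ∧ PySem.List.pyGetD result i 0 < 6 then (1:Int) else 0)).sum,
       w + (l.map (fun i => if 40 ≤ PySem.List.pyGetD attendance i 0 ∧ PySem.List.pyGetD result i 0 < 6 then (1:Int) else 0)).sum
         + (l.map (fun i => if PySem.List.pyGetD attendance i 0 < 40 ∧ 6 ≤ PySem.List.pyGetD result i 0 then (1:Int) else 0)).sum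
         + (l.map (fun i => if PySem.List.pyGetD attendance i 0 < 40 ∧ PySem.List.pyGetD result i 0 < 6 then (1:Int) else 0)).sum) := by
  induction l generalizing x y z w with
  | nil => simp
  | cons hd tl ih =>
    simp only [List.foldl_cons, List.map_cons, List.sum_cons]
    split_ifs <;> rw [ih] <;>
      refine Prod.ext ?_ (Prod.ext ?_ (Prod.ext ?_ ?_)) <;> simp <;> omega

-- ===== VERDICT (by name: the statement is the Claim_ definition above) =====
theorem failed_spec : Claim_equal_failed := by
  intro result attendance _ _
  unfold Spec_failed failed failed_alt pvCatSum
  rw [pvFold_eq]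
  simp
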